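-- pv_equiv track=rewrite | github.com/w32siooo/aoc_2023_solutions | day09/aoc.py | find_diff_matrix_p2
-- ===== SOURCE A (Python) =====
-- def custom_len(start, stop):
--     return  stop-start
--
-- def find_diff_matrix_p2(ex,result=None):
--     if result is None:
--         result = []
--     diffs=[]
--     for ins in range(len(ex)-1):
--         calculation = custom_len(ex[ins],ex[ins+1])
--         diffs.append(calculation)
--     result.append(diffs)
--     if all(element == 0 for element in diffs):
--         return result
--     else:
--         return find_diff_matrix_p2(diffs,result)
-- ===== SOURCE B (Python) =====
-- def find_diff_matrix_p2(ex, result=None):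
--     rows = [] if result is None else result
--     current = ex
--     while True:
--         diffs = [b - a for a, b in zip(current, current[1:])]
--         rows.append(diffs)
--         if all(e == 0 for e in diffs):
--             return rows
--         current = diffs
-- ===== Notes on version B (the rewrite author's own statement) =====
-- stated objective: simpler
-- what changed: Replaced the tail recursion carrying an accumulator argument and the index-based range loop with an explicit iterative while-loop over the same difference recurrence, computing each diff row by zipping the list with its own tail.
import Mathlib
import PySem

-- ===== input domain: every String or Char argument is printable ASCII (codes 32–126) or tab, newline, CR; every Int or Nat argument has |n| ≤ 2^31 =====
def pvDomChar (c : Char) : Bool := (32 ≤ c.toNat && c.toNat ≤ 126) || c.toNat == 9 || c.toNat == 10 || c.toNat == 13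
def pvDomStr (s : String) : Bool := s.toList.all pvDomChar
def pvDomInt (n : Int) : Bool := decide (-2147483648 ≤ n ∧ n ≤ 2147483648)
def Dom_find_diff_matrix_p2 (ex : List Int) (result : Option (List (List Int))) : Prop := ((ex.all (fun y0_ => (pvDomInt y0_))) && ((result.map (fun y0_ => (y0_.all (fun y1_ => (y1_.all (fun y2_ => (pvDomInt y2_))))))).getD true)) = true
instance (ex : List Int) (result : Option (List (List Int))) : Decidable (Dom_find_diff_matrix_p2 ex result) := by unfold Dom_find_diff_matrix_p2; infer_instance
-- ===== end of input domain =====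

-- B replaces A's tail recursion (accumulator parameter + index loop over range) by an explicit
-- iterative loop zipping the row with its tail; same values, objective: simpler.
-- NOTE: both Pythons append the diff rows to the caller's `result` list in place; the equivalence
-- proved here is about the RETURN value (both perform the same mutation).

-- ===== PORT A =====
def custom_len (start stop : Int) : Int := stop - start

-- the `diffs` the for-loop over range(len(ex)-1) builds (named so the port can cite length facts)
def diffRowA (ex : List Int) : List Int :=
  (PySem.List.pyRange 0 ((ex.length : Int) - 1) 1).foldl
    (fun ds ins => ds ++ [custom_len (PySem.List.pyGetD ex ins 0) (PySem.List.pyGetD ex (ins + 1) 0)]) []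
  -- ex[ins], ex[ins+1]: the range indices are always in bounds, so the default 0 never fires

theorem foldl_push {α β : Type} (f : α → β) (l : List α) (init : List β) :
    l.foldl (fun ds x => ds ++ [f x]) init = init ++ l.map f := by
  induction l generalizing init with
  | nil => simp
  | cons a t ih => simp [List.foldl_cons, ih]

theorem diffRowA_eq_map (ex : List Int) :
    diffRowA ex = (PySem.List.pyRange 0 ((ex.length : Int) - 1) 1).map
      (fun ins => custom_len (PySem.List.pyGetD ex ins 0) (PySem.List.pyGetD ex (ins + 1) 0)) := by
  unfold diffRowA
  rw [foldl_push (fun ins => custom_len (PySem.List.pyGetD ex ins 0) (PySem.List.pyGetD ex (ins + 1) 0))]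
  simp

theorem diffRowA_length_lt (ex : List Int) (h : diffRowA ex ≠ []) :
    (diffRowA ex).length < ex.length := by
  rw [diffRowA_eq_map] at h ⊢
  rw [List.length_map, PySem.List.length_pyRange_one]
  rcases ex with _ | ⟨a, t⟩
  · simp [PySem.List.pyRange] at h
  · simp only [List.length_cons]
    omega

def find_diff_matrix_p2 (ex : List Int) (result : Option (List (List Int))) : List (List Int) :=
  let r := result.getD []
  let diffs := diffRowA ex
  let r' := r ++ [diffs]
  if diffs.all (fun element => element == 0) then r'
  else find_diff_matrix_p2 diffs (some r')
termination_by ex.length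
decreasing_by
  rename_i h
  refine diffRowA_length_lt ex (fun hnil => h ?_)
  show ((diffRowA ex).all fun element => element == 0) = true
  rw [hnil]; rfl

-- ===== PORT B =====
theorem zip_tail_length_lt (cur : List Int) (h : (cur.zip (cur.drop 1)).map (fun ab => ab.2 - ab.1) ≠ []) :
    ((cur.zip (cur.drop 1)).map (fun ab => ab.2 - ab.1)).length < cur.length := by
  rcases cur with _ | ⟨a, t⟩
  · simp at h
  · simp only [List.length_map, List.length_zip, List.length_cons, List.drop_one, List.tail_cons]
    omega

def fdm_loop (current : List Int) (rows : List (List Int)) : List (List Int) :=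
  let diffs := (current.zip (current.drop 1)).map (fun ab => ab.2 - ab.1)
  let rows' := rows ++ [diffs]
  if diffs.all (fun e => e == 0) then rows'
  else fdm_loop diffs rows'
termination_by current.length
decreasing_by
  rename_i h
  refine zip_tail_length_lt current (fun hnil => h ?_)
  show (((current.zip (current.drop 1)).map fun ab => ab.2 - ab.1).all fun e => e == 0) = true
  rw [hnil]; rfl

def find_diff_matrix_p2_alt (ex : List Int) (result : Option (List (List Int))) : List (List Int) :=
  fdm_loop ex (result.getD [])

-- ===== PRECONDITION & SPEC =====
def Spec_find_diff_matrix_p2 (ex : List Int) (result : Option (List (List Int))) (out : List (List Int)) : Prop := out = find_diff_matrix_p2_alt ex result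
instance (ex : List Int) (result : Option (List (List Int))) (out : List (List Int)) : Decidable (Spec_find_diff_matrix_p2 ex result out) := by unfold Spec_find_diff_matrix_p2; infer_instance

-- ===== CLAIM (what is proved, stated in full; the proofs are below) =====
def Claim_equal_find_diff_matrix_p2 : Prop := ∀ (ex : List Int) (result : Option (List (List Int))), Dom_find_diff_matrix_p2 ex result → Spec_find_diff_matrix_p2 ex result (find_diff_matrix_p2 ex result)

-- ===== LEMMAS AND PROOFS =====

-- the two diff-row computations agree: index loop over range = zip with the tail
theorem diffRowA_eq_zip (ex : List Int) :
    diffRowA ex = (ex.zip (ex.drop 1)).map (fun ab => ab.2 - ab.1) := by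
  rw [diffRowA_eq_map]
  apply List.ext_getElem
  · simp [PySem.List.length_pyRange_one, List.length_zip]
    try omega
  · intro k h1 h2
    have hk : (k : Int) < (ex.length : Int) - 1 := by
      simp [PySem.List.length_pyRange_one] at h1; omega
    simp only [List.getElem_map, PySem.List.getElem_pyRange_one, List.getElem_zip,
      List.getElem_drop, custom_len]
    have h0 : (0 : Int) + (k : Int) = ((k : Nat) : Int) := by omega
    rw [h0, PySem.List.pyGetD_natCast]
    have h1' : ((k : Nat) : Int) + 1 = (((k + 1 : Nat)) : Int) := by push_cast; ring
    rw [h1', PySem.List.pyGetD_natCast]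
    have hlen : k + 1 < ex.length := by omega
    have hc : 1 + k = k + 1 := by omega
    simp [List.getD_eq_getElem?_getD, hlen, Nat.lt_of_succ_lt hlen, hc]

theorem find_eq_loop (n : Nat) : ∀ (ex : List Int) (result : Option (List (List Int))),
    ex.length ≤ n → find_diff_matrix_p2 ex result = fdm_loop ex (result.getD []) := by
  induction n with
  | zero =>
    intro ex result h
    have hex : ex = [] := List.length_eq_zero_iff.mp (Nat.le_zero.mp h)
    subst hex
    rw [find_diff_matrix_p2.eq_def, fdm_loop.eq_def]
    simp [diffRowA, PySem.List.pyRange]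
  | succ m ih =>
    intro ex result h
    rw [find_diff_matrix_p2.eq_def, fdm_loop.eq_def]
    simp only [diffRowA_eq_zip]
    set diffs := (ex.zip (ex.drop 1)).map (fun ab => ab.2 - ab.1) with hd
    by_cases hall : diffs.all (fun e => e == 0)
    · simp [hall]
    · simp only [hall, if_false, Bool.false_eq_true]
      have hnil : diffs ≠ [] := by
        intro hn; rw [hn] at hall; simp at hall
      have hlt : diffs.length < ex.length := zip_tail_length_lt ex (hd ▸ hnil)
      have := ih diffs (some (result.getD [] ++ [diffs])) (by omega)
      simpa [diffRowA_eq_zip] using this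

-- ===== VERDICT (by name: the statement is the Claim_ definition above) =====
theorem find_diff_matrix_p2_spec : Claim_equal_find_diff_matrix_p2 := by
  intro ex result _
  unfold Spec_find_diff_matrix_p2 find_diff_matrix_p2_alt
  exact find_eq_loop ex.length ex result le_rfl
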